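-- pv_equiv track=rewrite | github.com/JenyaYurch/DAEAU22 | Python-data-types/data-types-final-task-2-student-template/tasks/task.py | check
-- ===== SOURCE A (Python) =====
-- from typing import List
--
-- def check(row_start:int, row_end:int, column_start:int, column_end:int) -> List[List[int]]:
--     result=[]
--     tmp=[]
--     last=0
--     if row_start>row_end or column_start>column_end:
--         return
--     a=[i for i in range(row_start, row_end+1)]
--     b=[l for l in range(column_start, column_end+1)]
--     for x in range(abs(len(a))):
--         for y in range(abs(len(b))):
--             tmp.append(a[x]*b[y])
--     while len(result) < abs(len(a)):
--         result.append(tmp[int(last):int(abs(len(b))+last)])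
--         last+=abs(len(b))
--     return result
-- ===== SOURCE B (Python) =====
-- def check(row_start: int, row_end: int, column_start: int, column_end: int):
--     if row_start > row_end or column_start > column_end:
--         return
--     return [[x * y for y in range(column_start, column_end + 1)]
--             for x in range(row_start, row_end + 1)]
-- ===== Notes on version B (the rewrite author's own statement) =====
-- stated objective: simpler
-- what changed: B builds the nested table directly row by row with a nested comprehension, removing A's flat tmp buffer, index-based nested loops, and the while-loop that re-slices the flat list back into rows.
import Mathlib
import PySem

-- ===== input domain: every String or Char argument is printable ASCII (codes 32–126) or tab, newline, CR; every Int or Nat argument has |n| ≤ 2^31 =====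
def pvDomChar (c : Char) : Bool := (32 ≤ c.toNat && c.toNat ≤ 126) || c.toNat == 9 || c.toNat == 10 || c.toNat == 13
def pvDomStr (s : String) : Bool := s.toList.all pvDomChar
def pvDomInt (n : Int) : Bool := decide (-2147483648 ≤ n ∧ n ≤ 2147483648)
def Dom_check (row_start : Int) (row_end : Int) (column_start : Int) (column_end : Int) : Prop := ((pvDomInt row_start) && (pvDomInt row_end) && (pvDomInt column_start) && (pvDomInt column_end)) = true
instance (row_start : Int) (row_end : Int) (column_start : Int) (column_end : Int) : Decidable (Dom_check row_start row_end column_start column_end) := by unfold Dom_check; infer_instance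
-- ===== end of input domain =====

-- B builds the nested table directly row by row, removing A's flat tmp buffer and the
-- while-loop that re-slices it into rows (objective: simpler; same asymptotic cost).

-- ===== PORT A =====
-- the while-loop: each pass appends tmp[last : len(b)+last]; it runs exactly len(a) times
-- (result starts empty and grows by one per pass), modelled as structural recursion on that count
def checkLoop (tmp : List Int) (bl : Int) : Nat → Int → List (List Int) → List (List Int)
  | 0, _, result => result
  | n + 1, last, result =>
      checkLoop tmp bl n (last + bl)
        (result ++ [PySem.List.slice tmp (some last) (some (bl + last))])

def check (row_start : Int) (row_end : Int) (column_start : Int) (column_end : Int) : Option (List (List Int)) :=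
  if row_start > row_end ∨ column_start > column_end then none
  else
    let a := PySem.List.pyRange row_start (row_end + 1) 1
    let b := PySem.List.pyRange column_start (column_end + 1) 1
    -- for x in range(abs(len(a))): for y in range(abs(len(b))): tmp.append(a[x]*b[y])
    -- (abs(len(..)) = len(..); a[x], b[y] are in range, ported with pyGetD)
    let tmp := (PySem.List.pyRange 0 (a.length : Int) 1).foldl (fun tmp x =>
      (PySem.List.pyRange 0 (b.length : Int) 1).foldl (fun tmp y =>
        tmp ++ [PySem.List.pyGetD a x 0 * PySem.List.pyGetD b y 0]) tmp) []
    some (checkLoop tmp (b.length : Int) a.length 0 [])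

-- ===== PORT B =====
def check_alt (row_start : Int) (row_end : Int) (column_start : Int) (column_end : Int) : Option (List (List Int)) :=
  if row_start > row_end ∨ column_start > column_end then none
  else
    some ((PySem.List.pyRange row_start (row_end + 1) 1).map (fun x =>
      (PySem.List.pyRange column_start (column_end + 1) 1).map (fun y => x * y)))

-- ===== PRECONDITION & SPEC =====
def Spec_check (row_start : Int) (row_end : Int) (column_start : Int) (column_end : Int) (out : Option (List (List Int))) : Prop := out = check_alt row_start row_end column_start column_end
instance (row_start : Int) (row_end : Int) (column_start : Int) (column_end : Int) (out : Option (List (List Int))) : Decidable (Spec_check row_start row_end column_start column_end out) := by unfold Spec_check; infer_instance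

-- ===== CLAIM (what is proved, stated in full; the proofs are below) =====
def Claim_equal_check : Prop := ∀ (row_start : Int) (row_end : Int) (column_start : Int) (column_end : Int), Dom_check row_start row_end column_start column_end → Spec_check row_start row_end column_start column_end (check row_start row_end column_start column_end)

-- ===== LEMMAS AND PROOFS =====

-- re-slicing the concatenation of equal-length rows gives back the rows
theorem checkLoop_chunks (rows : List (List Int)) (k : Nat)
    (tmp : List Int) (j : Nat) (res : List (List Int))
    (hk : ∀ r ∈ rows, r.length = k) (hdrop : tmp.drop j = rows.flatten) :
    checkLoop tmp (k : Int) rows.length (j : Int) res = res ++ rows := by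
  induction rows generalizing j res with
  | nil => simp [checkLoop]
  | cons hd rest ih =>
      have hr : hd.length = k := hk hd (by simp)
      have hslice : PySem.List.slice tmp (some (j : Int)) (some ((k : Int) + (j : Int))) = hd := by
        rw [add_comm, PySem.List.slice_natCast_add, hdrop, List.flatten_cons, ← hr,
          List.take_left]
      have hdrop' : tmp.drop (j + k) = rest.flatten := by
        rw [← List.drop_drop, hdrop, List.flatten_cons, ← hr, List.drop_left]
      have hcast : (j : Int) + (k : Int) = ((j + k : Nat) : Int) := by push_cast; ring
      simp only [List.length_cons, checkLoop, hslice, hcast]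
      rw [ih (j + k) (res ++ [hd]) (fun s hs => hk s (by simp [hs])) hdrop']
      simp

theorem check_eq_alt (row_start row_end column_start column_end : Int) :
    check row_start row_end column_start column_end
      = check_alt row_start row_end column_start column_end := by
  unfold check check_alt
  split_ifs with h
  · rfl
  · congr 1
    set a := PySem.List.pyRange row_start (row_end + 1) 1 with ha
    set b := PySem.List.pyRange column_start (column_end + 1) 1 with hb
    have htmp : (PySem.List.pyRange 0 (a.length : Int) 1).foldl (fun tmp x =>
        (PySem.List.pyRange 0 (b.length : Int) 1).foldl (fun tmp y =>
          tmp ++ [PySem.List.pyGetD a x 0 * PySem.List.pyGetD b y 0]) tmp) []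
        = (a.map (fun x => b.map (fun y => x * y))).flatten := by
      rw [PySem.List.foldl_pyRange_zero_pyGetD' a 0
        (fun tmp xv => (PySem.List.pyRange 0 (b.length : Int) 1).foldl (fun tmp y =>
          tmp ++ [xv * PySem.List.pyGetD b y 0]) tmp) []]
      have hinner : ∀ (xv : Int) (acc : List Int),
          (PySem.List.pyRange 0 (b.length : Int) 1).foldl (fun tmp y =>
            tmp ++ [xv * PySem.List.pyGetD b y 0]) acc = acc ++ b.map (fun y => xv * y) := by
        intro xv acc
        rw [PySem.List.foldl_pyRange_zero_pyGetD' b 0 (fun tmp yv => tmp ++ [xv * yv]) acc]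
        rw [PySem.List.foldl_append_singleton_eq_map]
      calc a.foldl (fun tmp xv => (PySem.List.pyRange 0 (b.length : Int) 1).foldl
              (fun tmp y => tmp ++ [xv * PySem.List.pyGetD b y 0]) tmp) []
          = a.foldl (fun tmp xv => tmp ++ b.map (fun y => xv * y)) [] := by
            apply PySem.List.foldl_congr_mem
            intro acc xv _; exact hinner xv acc
        _ = (a.map (fun x => b.map (fun y => x * y))).flatten := by
            rw [PySem.List.foldl_append_eq_flatMap]
            simp [List.flatMap_def]
    simp only [htmp]
    have := checkLoop_chunks (a.map (fun x => b.map (fun y => x * y))) b.length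
      ((a.map (fun x => b.map (fun y => x * y))).flatten) 0 []
      (by intro r hr; simp at hr; obtain ⟨x, _, rfl⟩ := hr; simp)
      (by simp)
    simpa using this

-- ===== VERDICT (by name: the statement is the Claim_ definition above) =====
theorem check_spec : Claim_equal_check := by
  intro rs re cs ce _
  unfold Spec_check
  exact check_eq_alt rs re cs ce
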